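-- pv_equiv track=rewrite | github.com/duwiantor-dev/stoktiktok | app.py | sheet_range_between
-- ===== SOURCE A (Python) =====
-- from typing import Dict, Tuple, List, Optional, Set
--
-- def sheet_range_between(sheetnames: List[str], start: str, end: str) -> List[str]:
--     up = [s.upper() for s in sheetnames]
--     if start.upper() not in up or end.upper() not in up:
--         raise ValueError(f"Sheet range tidak valid. Pastikan ada '{start}' dan '{end}'.")
--     i0 = up.index(start.upper())
--     i1 = up.index(end.upper())
--     if i0 > i1:
--         i0, i1 = i1, i0
--     return sheetnames[i0:i1 + 1]
-- ===== SOURCE B (Python) =====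
-- def sheet_range_between(sheetnames, start, end):
--     # Index-free streaming algorithm: walk the names once; the first name matching
--     # either bound (case-insensitively) opens the slice, then names are collected
--     # until the first name matching the other bound closes it. Correct because the
--     # closing bound's first occurrence cannot lie before the opening one.
--     su, eu = start.upper(), end.upper()
--     want = None
--     out = []
--     for s in sheetnames:
--         u = s.upper()
--         if want is None:
--             if u == su and u == eu:
--                 return [s]
--             elif u == su:
--                 want = eu
--                 out.append(s)
--             elif u == eu:
--                 want = su
--                 out.append(s)
--         else:
--             out.append(s)
--             if u == want:
--                 return out
--     raise ValueError(f"Sheet range tidak valid. Pastikan ada '{start}' dan '{end}'.")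
-- ===== Notes on version B (the rewrite author's own statement) =====
-- stated objective: alternative
-- what changed: Replaces A's index arithmetic (build upper list, two membership tests, two .index lookups, swap, slice) by an index-free streaming scan: the first name matching either bound opens the output list and names are appended until the first name matching the other bound closes it.
import Mathlib
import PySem

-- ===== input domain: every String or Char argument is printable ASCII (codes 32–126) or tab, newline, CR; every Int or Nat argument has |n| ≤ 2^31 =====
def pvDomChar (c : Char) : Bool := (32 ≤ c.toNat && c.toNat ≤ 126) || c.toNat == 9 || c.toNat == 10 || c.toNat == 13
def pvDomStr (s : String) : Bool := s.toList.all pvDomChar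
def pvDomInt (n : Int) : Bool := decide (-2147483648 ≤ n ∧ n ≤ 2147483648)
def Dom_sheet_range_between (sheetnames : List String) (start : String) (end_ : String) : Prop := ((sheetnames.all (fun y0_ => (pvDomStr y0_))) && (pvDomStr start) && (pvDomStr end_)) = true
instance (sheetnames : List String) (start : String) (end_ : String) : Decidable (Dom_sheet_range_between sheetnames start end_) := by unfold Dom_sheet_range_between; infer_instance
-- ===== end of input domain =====

-- ===== PORT A =====
-- B replaces A's index arithmetic by an index-free streaming scan (open the slice at
-- the first name matching either bound, close it at the other); same values on Pre_.
def sheet_range_between (sheetnames : List String) (start : String) (end_ : String) : List String :=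
  let up := sheetnames.map PySem.Str.upper
  if PySem.Str.upper start ∉ up ∨ PySem.Str.upper end_ ∉ up then
    []  -- Python raises ValueError here; excluded by Pre_
  else
    let i0 := (PySem.List.index? up (PySem.Str.upper start)).getD 0
    let i1 := (PySem.List.index? up (PySem.Str.upper end_)).getD 0
    let p := if i0 > i1 then (i1, i0) else (i0, i1)
    PySem.List.slice sheetnames (some (p.1 : Int)) (some ((p.2 : Int) + 1))

-- ===== PORT B =====
-- phase 2 of Source B's loop: want is fixed, append each name, stop after the first match
def collectUntil (ss : List String) (want : String) (out : List String) : Option (List String) :=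
  match ss with
  | [] => none  -- Python raises ValueError here
  | s :: t =>
    let out' := out ++ [s]
    if PySem.Str.upper s = want then some out' else collectUntil t want out'

-- phase 1 of Source B's loop: scan for the first name matching either bound
def findStart (ss : List String) (su eu : String) : Option (List String) :=
  match ss with
  | [] => none  -- Python raises ValueError here
  | s :: t =>
    let u := PySem.Str.upper s
    if u = su ∧ u = eu then some [s]
    else if u = su then collectUntil t eu [s]
    else if u = eu then collectUntil t su [s]
    else findStart t su eu

def sheet_range_between_alt (sheetnames : List String) (start : String) (end_ : String) : List String :=
  (findStart sheetnames (PySem.Str.upper start) (PySem.Str.upper end_)).getD []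

-- ===== PRECONDITION & SPEC =====
-- Pre_ excludes exactly the inputs on which the Python A raises ValueError (a named sheet missing).
def Pre_sheet_range_between (sheetnames : List String) (start : String) (end_ : String) : Prop :=
  PySem.Str.upper start ∈ sheetnames.map PySem.Str.upper ∧
  PySem.Str.upper end_ ∈ sheetnames.map PySem.Str.upper
instance (sheetnames : List String) (start : String) (end_ : String) : Decidable (Pre_sheet_range_between sheetnames start end_) := by unfold Pre_sheet_range_between; infer_instance

def pvWitness_sheet_range_between : List String × String × String := (["Jan", "Feb", "Mar"], "feb", "MAR")

def Spec_sheet_range_between (sheetnames : List String) (start : String) (end_ : String) (out : List String) : Prop := out = sheet_range_between_alt sheetnames start end_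
instance (sheetnames : List String) (start : String) (end_ : String) (out : List String) : Decidable (Spec_sheet_range_between sheetnames start end_ out) := by unfold Spec_sheet_range_between; infer_instance

-- ===== CLAIM =====
def Claim_equal_sheet_range_between : Prop := ∀ (sheetnames : List String) (start : String) (end_ : String), Dom_sheet_range_between sheetnames start end_ → Pre_sheet_range_between sheetnames start end_ → Spec_sheet_range_between sheetnames start end_ (sheet_range_between sheetnames start end_)

-- ===== LEMMAS AND PROOFS =====

theorem collectUntil_spec (want : String) :
    ∀ (t out : List String) (k : Nat),
      PySem.List.index? (t.map PySem.Str.upper) want = some k →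
      collectUntil t want out = some (out ++ t.take (k + 1)) := by
  intro t
  induction t with
  | nil => intro out k h; simp [PySem.List.index?_eq_idxOf?] at h
  | cons s r ih =>
    intro out k h
    by_cases hs : PySem.Str.upper s = want
    · rw [List.map_cons, hs, PySem.List.index?_cons_self] at h
      cases h
      simp [collectUntil, hs]
    · rw [List.map_cons, PySem.List.index?_cons_of_ne _ hs] at h
      obtain ⟨k', hk', rfl⟩ := Option.map_eq_some_iff.mp h
      simp only [collectUntil, hs, if_false]
      rw [ih (out ++ [s]) k' hk']
      simp [List.take_succ_cons]

theorem findStart_spec (su eu : String) :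
    ∀ (ss : List String) (i0 i1 : Nat),
      PySem.List.index? (ss.map PySem.Str.upper) su = some i0 →
      PySem.List.index? (ss.map PySem.Str.upper) eu = some i1 →
      findStart ss su eu = some ((ss.drop (min i0 i1)).take (max i0 i1 - min i0 i1 + 1)) := by
  intro ss
  induction ss with
  | nil => intro i0 i1 h0 _; simp [PySem.List.index?_eq_idxOf?] at h0
  | cons s t ih =>
    intro i0 i1 h0 h1
    by_cases hsu : PySem.Str.upper s = su <;> by_cases heu : PySem.Str.upper s = eu
    · rw [List.map_cons, hsu, PySem.List.index?_cons_self] at h0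
      rw [List.map_cons, heu, PySem.List.index?_cons_self] at h1
      cases h0; cases h1
      have heq : su = eu := hsu.symm.trans heu
      simp [findStart, hsu, heq]
    · rw [List.map_cons, hsu, PySem.List.index?_cons_self] at h0
      rw [List.map_cons, PySem.List.index?_cons_of_ne _ heu] at h1
      cases h0
      obtain ⟨k, hk, rfl⟩ := Option.map_eq_some_iff.mp h1
      have hne : su ≠ eu := fun h => heu (h ▸ hsu)
      simp only [findStart, hsu, hne, and_false, if_false, if_true]
      rw [collectUntil_spec eu t [s] k hk]
      simp [List.take_succ_cons]
    · rw [List.map_cons, heu, PySem.List.index?_cons_self] at h1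
      rw [List.map_cons, PySem.List.index?_cons_of_ne _ hsu] at h0
      cases h1
      obtain ⟨k, hk, rfl⟩ := Option.map_eq_some_iff.mp h0
      have hne : eu ≠ su := fun h => hsu (h ▸ heu)
      simp only [findStart, heu, hne, false_and, if_false, if_true]
      rw [collectUntil_spec su t [s] k hk]
      simp [List.take_succ_cons]
    · rw [List.map_cons, PySem.List.index?_cons_of_ne _ hsu] at h0
      rw [List.map_cons, PySem.List.index?_cons_of_ne _ heu] at h1
      obtain ⟨k0, hk0, rfl⟩ := Option.map_eq_some_iff.mp h0
      obtain ⟨k1, hk1, rfl⟩ := Option.map_eq_some_iff.mp h1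
      simp only [findStart, hsu, heu, and_false, if_false]
      rw [ih k0 k1 hk0 hk1]
      have hmin : min (k0 + 1) (k1 + 1) = min k0 k1 + 1 := by omega
      have hmax : max (k0 + 1) (k1 + 1) = max k0 k1 + 1 := by omega
      rw [hmin, hmax]
      simp

-- ===== VERDICT =====
theorem sheet_range_between_spec : Claim_equal_sheet_range_between := by
  intro sheetnames start end_ _ hpre
  obtain ⟨h0, h1⟩ := hpre
  unfold Spec_sheet_range_between sheet_range_between sheet_range_between_alt
  obtain ⟨i0, hi0⟩ := Option.isSome_iff_exists.mp
    ((PySem.List.index?_isSome_iff _ _).mpr h0)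
  obtain ⟨i1, hi1⟩ := Option.isSome_iff_exists.mp
    ((PySem.List.index?_isSome_iff _ _).mpr h1)
  rw [findStart_spec _ _ _ i0 i1 hi0 hi1]
  simp only [h0, h1, hi0, hi1, not_true, or_self, if_false, Option.getD_some]
  have hslice : PySem.List.slice sheetnames (some ((min i0 i1 : Nat) : Int))
      (some (((max i0 i1 : Nat) : Int) + 1)) =
      (sheetnames.drop (min i0 i1)).take (max i0 i1 - min i0 i1 + 1) := by
    have := PySem.List.slice_natCast sheetnames (min i0 i1) (max i0 i1 + 1)
    push_cast at this ⊢
    rw [this]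
    congr 1
    omega
  by_cases h : i0 > i1
  · have hm : min i0 i1 = i1 := by omega
    have hM : max i0 i1 = i0 := by omega
    rw [hm, hM] at hslice
    simpa [h, hm, hM] using hslice
  · have hm : min i0 i1 = i0 := by omega
    have hM : max i0 i1 = i1 := by omega
    rw [hm, hM] at hslice
    simpa [h, hm, hM] using hslice
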